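-- pv_equiv track=rewrite | github.com/LeonardLeroy/EcoCode | src/ecocode/core/profiler.py | _parse_linux_cgroup_relative_path
-- ===== SOURCE A (Python) =====
-- def _parse_linux_cgroup_relative_path(proc_cgroup_text: str) -> str | None:
--     """Extract cgroup relative path from /proc/<pid>/cgroup content."""
--
--     for raw_line in proc_cgroup_text.splitlines():
--         line = raw_line.strip()
--         if not line:
--             continue
--
--         # v2 format: 0::/path
--         parts = line.split(":", 2)
--         if len(parts) != 3:
--             continue
--
--         _, controllers, relative = parts
--         if controllers == "":
--             return relative
--
--     # v1 fallback: use first available hierarchy path.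
--     for raw_line in proc_cgroup_text.splitlines():
--         line = raw_line.strip()
--         if not line:
--             continue
--         parts = line.split(":", 2)
--         if len(parts) != 3:
--             continue
--         return parts[2]
--
--     return None
-- ===== SOURCE B (Python) =====
-- def _parse_linux_cgroup_relative_path(proc_cgroup_text: str) -> str | None:
--     """Single pass: return the first v2 line's path immediately; remember the
--     first valid line's path as a v1 fallback."""
--     fallback = None
--     for raw_line in proc_cgroup_text.splitlines():
--         line = raw_line.strip()
--         if not line:
--             continue
--         parts = line.split(":", 2)
--         if len(parts) != 3:
--             continue
--         if parts[1] == "":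
--             return parts[2]
--         if fallback is None:
--             fallback = parts[2]
--     return fallback
-- ===== Notes on version B (the rewrite author's own statement) =====
-- stated objective: simpler
-- what changed: Replaces A's two sequential scans of the lines (v2 search, then v1 fallback rescan) with a single pass that returns a v2 match immediately and records the first valid line as fallback.
import Mathlib
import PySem

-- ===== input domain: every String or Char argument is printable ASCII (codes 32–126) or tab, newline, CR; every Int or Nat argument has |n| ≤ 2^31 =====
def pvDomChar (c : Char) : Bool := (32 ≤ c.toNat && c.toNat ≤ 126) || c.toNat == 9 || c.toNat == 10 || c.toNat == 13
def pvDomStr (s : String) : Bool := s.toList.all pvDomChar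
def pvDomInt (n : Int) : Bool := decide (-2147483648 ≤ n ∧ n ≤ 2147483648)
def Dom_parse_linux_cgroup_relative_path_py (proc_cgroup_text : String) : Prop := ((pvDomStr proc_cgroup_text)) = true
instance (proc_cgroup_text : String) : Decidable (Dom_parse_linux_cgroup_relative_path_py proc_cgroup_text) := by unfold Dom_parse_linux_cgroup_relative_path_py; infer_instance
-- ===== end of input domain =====

-- B merges A's two sequential scans into one pass (v2 match returns at once; first
-- valid line is remembered as the v1 fallback); objective: simpler, same result.

-- ===== PORT A =====
-- first loop: return the v2 line's path if one exists
def pvALoop1 : List String → Option String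
  | [] => none
  | raw_line :: rest =>
    let line := PySem.Str.strip raw_line
    if line = "" then pvALoop1 rest
    else
      match PySem.Str.splitMax? line ":" 2 with
      | some [_, controllers, relative] =>
        if controllers = "" then some relative else pvALoop1 rest
      | _ => pvALoop1 rest

-- second loop: first valid line's path (v1 fallback)
def pvALoop2 : List String → Option String
  | [] => none
  | raw_line :: rest =>
    let line := PySem.Str.strip raw_line
    if line = "" then pvALoop2 rest
    else
      match PySem.Str.splitMax? line ":" 2 with
      | some [_, _, relative] => some relative
      | _ => pvALoop2 rest

def parse_linux_cgroup_relative_path_py (proc_cgroup_text : String) : Option String :=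
  let ls := PySem.Str.splitlines proc_cgroup_text
  match pvALoop1 ls with
  | some r => some r
  | none => pvALoop2 ls

-- ===== PORT B =====
-- one pass with a fallback accumulator
def pvBLoop : List String → Option String → Option String
  | [], fallback => fallback
  | raw_line :: rest, fallback =>
    let line := PySem.Str.strip raw_line
    if line = "" then pvBLoop rest fallback
    else
      match PySem.Str.splitMax? line ":" 2 with
      | some [_, controllers, relative] =>
        if controllers = "" then some relative
        else pvBLoop rest (match fallback with | none => some relative | some f => some f)
      | _ => pvBLoop rest fallback

def parse_linux_cgroup_relative_path_py_alt (proc_cgroup_text : String) : Option String :=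
  pvBLoop (PySem.Str.splitlines proc_cgroup_text) none

-- ===== PRECONDITION & SPEC =====
def Spec_parse_linux_cgroup_relative_path_py (proc_cgroup_text : String) (out : Option String) : Prop := out = parse_linux_cgroup_relative_path_py_alt proc_cgroup_text
instance (proc_cgroup_text : String) (out : Option String) : Decidable (Spec_parse_linux_cgroup_relative_path_py proc_cgroup_text out) := by unfold Spec_parse_linux_cgroup_relative_path_py; infer_instance

-- ===== CLAIM (what is proved, stated in full; the proofs are below) =====
def Claim_equal_parse_linux_cgroup_relative_path_py : Prop := ∀ (proc_cgroup_text : String), Dom_parse_linux_cgroup_relative_path_py proc_cgroup_text → Spec_parse_linux_cgroup_relative_path_py proc_cgroup_text (parse_linux_cgroup_relative_path_py proc_cgroup_text)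

-- ===== LEMMAS AND PROOFS =====
theorem pvBLoop_eq (ls : List String) (fb : Option String) :
    pvBLoop ls fb =
      match pvALoop1 ls with
      | some r => some r
      | none => match fb with
        | some f => some f
        | none => pvALoop2 ls := by
  induction ls generalizing fb with
  | nil => cases fb <;> simp [pvBLoop, pvALoop1, pvALoop2]
  | cons l rest ih =>
    simp only [pvBLoop, pvALoop1, pvALoop2]
    by_cases h : PySem.Str.strip l = ""
    · simp [h, ih]
    · simp only [h, if_false]
      rcases hs : PySem.Str.splitMax? (PySem.Str.strip l) ":" 2 with _ | parts
      · simp [ih]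
      · match parts with
        | [] => simp [ih]
        | [a] => simp [ih]
        | [a, b] => simp [ih]
        | a :: b :: c :: d :: t => simp [ih]
        | [a, b, c] =>
          by_cases hb : b = ""
          · simp [hb]
          · simp only [hb, if_false, ih]
            cases fb <;> rcases pvALoop1 rest <;> simp

-- ===== VERDICT (by name: the statement is the Claim_ definition above) =====
theorem parse_linux_cgroup_relative_path_py_spec : Claim_equal_parse_linux_cgroup_relative_path_py := by
  intro s _
  unfold Spec_parse_linux_cgroup_relative_path_py parse_linux_cgroup_relative_path_py parse_linux_cgroup_relative_path_py_alt
  rw [pvBLoop_eq]
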